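-- pv_equiv track=rewrite | github.com/Morne-Ingstar/Samsara | samsara/command_parser.py | strip_fillers
-- ===== SOURCE A (Python) =====
-- DEFAULT_FILLERS = frozenset({'please', 'uh', 'um', 'like'})
--
-- def strip_fillers(text, fillers=None):
--     """Remove leading/trailing filler words from *text*.
--
--     Only whole words at the edges are removed; interior fillers are left alone.
--     """
--     if fillers is None:
--         fillers = DEFAULT_FILLERS
--     words = text.split()
--     while words and words[0].lower() in fillers:
--         words.pop(0)
--     while words and words[-1].lower() in fillers:
--         words.pop()
--     return ' '.join(words)
-- ===== SOURCE B (Python) =====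
-- DEFAULT_FILLERS = frozenset({'please', 'uh', 'um', 'like'})
--
-- def strip_fillers(text, fillers=None):
--     """Remove leading/trailing filler words from *text* by trimming scans and slices."""
--     if fillers is None:
--         fillers = DEFAULT_FILLERS
--
--     def trim(ws):
--         # drop the leading run of filler words with one forward scan + one slice
--         i = 0
--         while i < len(ws) and ws[i].lower() in fillers:
--             i += 1
--         return ws[i:]
--
--     words = trim(text.split())
--     words = trim(words[::-1])[::-1]
--     return ' '.join(words)
-- ===== Notes on version B (the rewrite author's own statement) =====
-- stated objective: alternative
-- what changed: Replaces A's two while-loops of repeated list.pop(0)/pop() with a single forward scan computing the trim index followed by one slice, applied to the word list and then to its reverse; avoids pop(0)'s per-step shifting but was not measurably faster on the generated inputs.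
import Mathlib
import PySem

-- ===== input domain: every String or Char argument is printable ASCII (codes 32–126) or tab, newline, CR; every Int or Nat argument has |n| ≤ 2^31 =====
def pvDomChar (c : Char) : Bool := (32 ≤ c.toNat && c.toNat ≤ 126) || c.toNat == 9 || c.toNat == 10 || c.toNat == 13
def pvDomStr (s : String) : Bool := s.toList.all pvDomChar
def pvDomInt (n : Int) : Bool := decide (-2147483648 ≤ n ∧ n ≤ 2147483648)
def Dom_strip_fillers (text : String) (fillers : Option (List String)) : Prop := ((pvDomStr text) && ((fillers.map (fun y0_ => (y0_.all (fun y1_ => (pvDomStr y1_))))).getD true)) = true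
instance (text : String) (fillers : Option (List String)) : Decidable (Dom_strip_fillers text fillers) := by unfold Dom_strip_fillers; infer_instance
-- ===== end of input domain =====

-- B replaces A's repeated pop(0)/pop() loops by one forward trimming scan applied twice
-- (once on the reversed list) with a single slice; objective: alternative algorithm, same result.

-- ===== PORT A =====
-- while words and words[0].lower() in fillers: words.pop(0)
def dropFrontA (fl : List String) : List String → List String
  | [] => []
  | w :: ws => if fl.contains (PySem.Str.lower w) then dropFrontA fl ws else w :: ws

-- while words and words[-1].lower() in fillers: words.pop()
def popBackA (fl : List String) (ws : List String) : List String :=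
  match h : ws.getLast? with
  | none => ws
  | some w =>
    if fl.contains (PySem.Str.lower w) then popBackA fl ws.dropLast else ws
termination_by ws.length
decreasing_by
  have hne : ws ≠ [] := by
    intro hnil; rw [hnil] at h; simp at h
  have := List.length_pos_iff.mpr hne
  simp [List.length_dropLast]; omega

def strip_fillers (text : String) (fillers : Option (List String)) : String :=
  let fl := fillers.getD ["please", "uh", "um", "like"]
  let words := PySem.Str.split₀ text
  PySem.Str.join " " (popBackA fl (dropFrontA fl words))

-- ===== PORT B =====
-- i = 0; while i < len(ws) and ws[i].lower() in fillers: i += 1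
def startIdxB (fl : List String) : List String → Nat
  | [] => 0
  | w :: ws => if fl.contains (PySem.Str.lower w) then startIdxB fl ws + 1 else 0

-- trim(ws) = ws[i:]
def trimB (fl : List String) (ws : List String) : List String :=
  ws.drop (startIdxB fl ws)

def strip_fillers_alt (text : String) (fillers : Option (List String)) : String :=
  let fl := fillers.getD ["please", "uh", "um", "like"]
  let words := trimB fl (PySem.Str.split₀ text)
  let words := (trimB fl words.reverse).reverse
  PySem.Str.join " " words

-- ===== PRECONDITION & SPEC =====
def Spec_strip_fillers (text : String) (fillers : Option (List String)) (out : String) : Prop := out = strip_fillers_alt text fillers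
instance (text : String) (fillers : Option (List String)) (out : String) : Decidable (Spec_strip_fillers text fillers out) := by unfold Spec_strip_fillers; infer_instance

-- ===== CLAIM (what is proved, stated in full; the proofs are below) =====
def Claim_equal_strip_fillers : Prop := ∀ (text : String) (fillers : Option (List String)), Dom_strip_fillers text fillers → Spec_strip_fillers text fillers (strip_fillers text fillers)

-- ===== LEMMAS AND PROOFS =====

theorem dropFrontA_eq_trimB (fl : List String) (ws : List String) :
    dropFrontA fl ws = trimB fl ws := by
  induction ws with
  | nil => rfl
  | cons w ws ih =>
    by_cases h : PySem.Str.lower w ∈ fl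
    · simpa [dropFrontA, trimB, startIdxB, h] using ih
    · simp [dropFrontA, trimB, startIdxB, h]

theorem popBackA_eq_rev_dropFrontA (fl : List String) (ws : List String) :
    popBackA fl ws = (dropFrontA fl ws.reverse).reverse := by
  induction ws using List.reverseRecOn with
  | nil => simp [popBackA, dropFrontA]
  | append_singleton ys w ih =>
    rw [popBackA]
    split
    · next hnone => simp at hnone
    · next w' hsome =>
      rw [List.getLast?_concat] at hsome
      obtain rfl : w = w' := by injection hsome
      simp only [List.reverse_append, List.reverse_cons, List.reverse_nil,
        List.nil_append, List.cons_append, dropFrontA, List.dropLast_concat]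
      by_cases h : PySem.Str.lower w ∈ fl
      · simpa [h] using ih
      · simp [h]

theorem strip_fillers_spec : Claim_equal_strip_fillers := by
  intro text fillers _
  unfold Spec_strip_fillers strip_fillers strip_fillers_alt
  simp only [popBackA_eq_rev_dropFrontA, dropFrontA_eq_trimB]

-- ===== VERDICT (by name: the statement is the Claim_ definition above) =====
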